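-- pv_equiv track=rewrite | github.com/Rakeshgsekhar/code_practice_c_plus_plus | codes/partyCouples.py | partyCouples
-- ===== SOURCE A (Python) =====
-- def partyCouples(n):
--     memo = {}
--     if n == 1 or n == 0:
--         return n
--     #if n == 3:
--         #return 4
--     if n in memo:
--         return memo[n]
--     else:
--         memo[n] = partyCouples(n-1) + partyCouples(n-2)*(n-1)
--         return memo[n]
-- ===== SOURCE B (Python) =====
-- def partyCouples(n):
--     if n < 2:
--         return n
--     prev, cur = 0, 1
--     for i in range(2, n + 1):
--         prev, cur = cur, cur + prev * (i - 1)
--     return cur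
-- ===== Notes on version B (the rewrite author's own statement) =====
-- stated objective: faster
-- what changed: Replaces A's naive double recursion (its memo dict is recreated empty on every call, so it never memoizes) with a bottom-up loop keeping only the last two values.
import Mathlib
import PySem

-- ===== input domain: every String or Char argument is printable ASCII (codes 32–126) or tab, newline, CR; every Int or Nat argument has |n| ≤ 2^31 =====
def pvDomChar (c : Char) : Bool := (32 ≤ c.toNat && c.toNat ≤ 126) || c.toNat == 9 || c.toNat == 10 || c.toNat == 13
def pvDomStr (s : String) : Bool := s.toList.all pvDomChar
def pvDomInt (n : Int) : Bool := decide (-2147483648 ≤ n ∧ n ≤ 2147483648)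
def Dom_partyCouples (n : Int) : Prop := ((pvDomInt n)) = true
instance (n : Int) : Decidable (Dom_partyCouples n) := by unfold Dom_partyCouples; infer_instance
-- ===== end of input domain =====

-- B replaces A's exponential double recursion (A's memo dict is always empty) with a linear bottom-up loop over two running values.


-- ===== PORT A =====
-- A's recursion, on the Nat magnitude of n (A only returns for n ≥ 0; negatives raise and are outside Pre_).
def pcA : Nat → Int
  | 0 => 0
  | 1 => 1
  | k + 2 => pcA (k + 1) + pcA k * ((k : Int) + 2 - 1)

def partyCouples (n : Int) : Int :=
  if n = 1 ∨ n = 0 then n else pcA n.toNat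

-- ===== PORT B =====
def partyCouples_alt (n : Int) : Int :=
  if n < 2 then n
  else ((PySem.List.pyRange 2 (n + 1) 1).foldl
          (fun (s : Int × Int) i => (s.2, s.2 + s.1 * (i - 1))) (0, 1)).2

-- ===== PRECONDITION & SPEC =====
-- Pre_ excludes n < 0, on which A's recursion never reaches a base case and raises RecursionError.
def Pre_partyCouples (n : Int) : Prop := 0 ≤ n
instance (n : Int) : Decidable (Pre_partyCouples n) := by unfold Pre_partyCouples; infer_instance
def pvWitness_partyCouples : Int := 5

def Spec_partyCouples (n : Int) (out : Int) : Prop := out = partyCouples_alt n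
instance (n : Int) (out : Int) : Decidable (Spec_partyCouples n out) := by unfold Spec_partyCouples; infer_instance

-- ===== CLAIM (what is proved, stated in full; the proofs are below) =====
def Claim_equal_partyCouples : Prop := ∀ (n : Int), Dom_partyCouples n → Pre_partyCouples n → Spec_partyCouples n (partyCouples n)

-- ===== LEMMAS AND PROOFS =====
lemma pcA_step (k : Nat) : pcA (k + 2) = pcA (k + 1) + pcA k * ((k : Int) + 1) := by
  rw [pcA]; ring

lemma loop_inv (m : Nat) :
    (PySem.List.pyRange 2 ((m : Int) + 3) 1).foldl
      (fun (s : Int × Int) i => (s.2, s.2 + s.1 * (i - 1))) (0, 1)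
    = (pcA (m + 1), pcA (m + 2)) := by
  induction m with
  | zero =>
      rw [show ((0 : Nat) : Int) + 3 = 2 + 1 by norm_num,
          PySem.List.pyRange_one_singleton]
      simp [pcA]
  | succ m ih =>
      have h : ((m + 1 : Nat) : Int) + 3 = ((m : Int) + 3) + 1 := by push_cast; ring
      rw [h, PySem.List.pyRange_one_succ_right (by omega), List.foldl_append, ih]
      simp only [List.foldl_cons, List.foldl_nil]
      have h2 : pcA (m + 1 + 2) = pcA (m + 2) + pcA (m + 1) * ((m : Int) + 2) := by
        have := pcA_step (m + 1); push_cast at this; linarith [this]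
      refine Prod.ext rfl ?_
      show pcA (m + 2) + pcA (m + 1) * ((m : Int) + 3 - 1) = pcA (m + 1 + 2)
      rw [h2]; ring

theorem partyCouples_spec : Claim_equal_partyCouples := by
  intro n _ hpre
  unfold Spec_partyCouples partyCouples partyCouples_alt
  obtain ⟨k, rfl⟩ : ∃ k : Nat, n = (k : Int) := ⟨n.toNat, (Int.toNat_of_nonneg hpre).symm⟩
  rcases k with _ | _ | m
  · norm_num
  · norm_num
  · have h1 : ¬(((m + 2 : Nat) : Int) = 1 ∨ ((m + 2 : Nat) : Int) = 0) := by push_cast; omega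
    have h2 : ¬(((m + 2 : Nat) : Int) < 2) := by push_cast; omega
    rw [if_neg h1, if_neg h2]
    have h3 : ((m + 2 : Nat) : Int) + 1 = (m : Int) + 3 := by push_cast; ring
    rw [h3, loop_inv]
    have h4 : ((m + 2 : Nat) : Int).toNat = m + 2 := by omega
    rw [h4]
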